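-- pv_equiv track=rewrite | github.com/optmizr/crashtestdummy | summary_analysis.py | categorize_crash
-- ===== SOURCE A (Python) =====
-- def categorize_crash(summary):
--     summary = str(summary).lower()  # Convert to lowercase
--
--     if any(
--         keyword in summary for keyword in ["collision", "midair", "crash into another"]
--     ):
--         return "Mid-Air Collision"
--     elif any(
--         keyword in summary
--         for keyword in ["engine failure", "mechanical failure", "technical issue"]
--     ):
--         return "Mechanical Failure"
--     elif any(keyword in summary for keyword in ["weather", "storm", "turbulence"]):
--         return "Weather-Related"
--     elif any(keyword in summary for keyword in ["fire", "explosion", "smoke"]):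
--         return "Fire/Explosion"
--     elif any(
--         keyword in summary
--         for keyword in ["pilot error", "loss of control", "incorrect maneuver"]
--     ):
--         return "Pilot Error"
--     elif any(keyword in summary for keyword in ["hijacking", "terrorist", "bomb"]):
--         return "Hijacking/Terrorism"
--     elif any(
--         keyword in summary for keyword in ["shot down", "missile", "military attack"]
--     ):
--         return "Shot Down (War/Conflict)"
--     elif any(keyword in summary for keyword in ["runway", "takeoff", "landing"]):
--         return "Takeoff/Landing Accident"
--     elif any(keyword in summary for keyword in ["fuel exhaustion", "ran out of fuel"]):
--         return "Fuel Exhaustion"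
--     else:
--         return "Other/Unknown"
-- ===== SOURCE B (Python) =====
-- # Flat keyword -> (priority, category) map, stored in ALPHABETICAL keyword order;
-- # one pass tracks the minimum-priority matching keyword (no elif chain, no
-- # priority-ordered scan: the priority is data, not control flow).
-- KEYWORD_RANK = {
--     "bomb": (5, "Hijacking/Terrorism"),
--     "collision": (0, "Mid-Air Collision"),
--     "crash into another": (0, "Mid-Air Collision"),
--     "engine failure": (1, "Mechanical Failure"),
--     "explosion": (3, "Fire/Explosion"),
--     "fire": (3, "Fire/Explosion"),
--     "fuel exhaustion": (8, "Fuel Exhaustion"),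
--     "hijacking": (5, "Hijacking/Terrorism"),
--     "incorrect maneuver": (4, "Pilot Error"),
--     "landing": (7, "Takeoff/Landing Accident"),
--     "loss of control": (4, "Pilot Error"),
--     "mechanical failure": (1, "Mechanical Failure"),
--     "midair": (0, "Mid-Air Collision"),
--     "military attack": (6, "Shot Down (War/Conflict)"),
--     "missile": (6, "Shot Down (War/Conflict)"),
--     "pilot error": (4, "Pilot Error"),
--     "ran out of fuel": (8, "Fuel Exhaustion"),
--     "runway": (7, "Takeoff/Landing Accident"),
--     "shot down": (6, "Shot Down (War/Conflict)"),
--     "smoke": (3, "Fire/Explosion"),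
--     "storm": (2, "Weather-Related"),
--     "takeoff": (7, "Takeoff/Landing Accident"),
--     "technical issue": (1, "Mechanical Failure"),
--     "terrorist": (5, "Hijacking/Terrorism"),
--     "turbulence": (2, "Weather-Related"),
--     "weather": (2, "Weather-Related"),
-- }
--
-- def categorize_crash(summary):
--     summary = str(summary).lower()
--     best = None
--     for keyword, rank in KEYWORD_RANK.items():
--         if keyword in summary and (best is None or rank[0] < best[0]):
--             best = rank
--     return best[1] if best is not None else "Other/Unknown"
-- ===== Notes on version B (the rewrite author's own statement) =====
-- stated objective: alternative
-- what changed: Replaces the nine-branch priority-ordered elif chain with a flat keyword->(priority,category) map scanned once in alphabetical keyword order while tracking the minimum-priority match; priority becomes data aggregated by a min-fold instead of control flow.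
import Mathlib
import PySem

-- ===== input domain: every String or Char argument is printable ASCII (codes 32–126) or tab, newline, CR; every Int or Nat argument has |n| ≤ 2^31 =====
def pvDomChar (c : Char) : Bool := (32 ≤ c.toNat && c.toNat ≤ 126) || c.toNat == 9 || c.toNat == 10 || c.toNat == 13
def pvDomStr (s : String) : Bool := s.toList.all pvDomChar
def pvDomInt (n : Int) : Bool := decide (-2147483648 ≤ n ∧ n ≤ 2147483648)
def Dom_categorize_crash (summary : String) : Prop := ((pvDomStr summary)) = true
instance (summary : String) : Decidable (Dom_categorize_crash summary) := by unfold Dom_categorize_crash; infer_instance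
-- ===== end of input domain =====

-- B replaces the priority-ordered elif chain by a min-priority fold over a flat
-- alphabetical keyword map (objective: alternative); return values proved equal.


-- ===== PORT A =====
-- A: literal elif chain of keyword membership tests on the lowered summary.
def categorize_crash (summary : String) : String :=
  let s := PySem.Str.lower summary
  if ["collision", "midair", "crash into another"].any (fun k => PySem.Str.isIn k s) then
    "Mid-Air Collision"
  else if ["engine failure", "mechanical failure", "technical issue"].any (fun k => PySem.Str.isIn k s) then
    "Mechanical Failure"
  else if ["weather", "storm", "turbulence"].any (fun k => PySem.Str.isIn k s) then
    "Weather-Related"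
  else if ["fire", "explosion", "smoke"].any (fun k => PySem.Str.isIn k s) then
    "Fire/Explosion"
  else if ["pilot error", "loss of control", "incorrect maneuver"].any (fun k => PySem.Str.isIn k s) then
    "Pilot Error"
  else if ["hijacking", "terrorist", "bomb"].any (fun k => PySem.Str.isIn k s) then
    "Hijacking/Terrorism"
  else if ["shot down", "missile", "military attack"].any (fun k => PySem.Str.isIn k s) then
    "Shot Down (War/Conflict)"
  else if ["runway", "takeoff", "landing"].any (fun k => PySem.Str.isIn k s) then
    "Takeoff/Landing Accident"
  else if ["fuel exhaustion", "ran out of fuel"].any (fun k => PySem.Str.isIn k s) then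
    "Fuel Exhaustion"
  else
    "Other/Unknown"

-- ===== PORT B =====
-- B: flat keyword -> (priority, category) map in alphabetical keyword order,
-- scanned once tracking the minimum-priority match.
def pvKeywordRank : List (String × Int × String) :=
  [("bomb", 5, "Hijacking/Terrorism"),
   ("collision", 0, "Mid-Air Collision"),
   ("crash into another", 0, "Mid-Air Collision"),
   ("engine failure", 1, "Mechanical Failure"),
   ("explosion", 3, "Fire/Explosion"),
   ("fire", 3, "Fire/Explosion"),
   ("fuel exhaustion", 8, "Fuel Exhaustion"),
   ("hijacking", 5, "Hijacking/Terrorism"),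
   ("incorrect maneuver", 4, "Pilot Error"),
   ("landing", 7, "Takeoff/Landing Accident"),
   ("loss of control", 4, "Pilot Error"),
   ("mechanical failure", 1, "Mechanical Failure"),
   ("midair", 0, "Mid-Air Collision"),
   ("military attack", 6, "Shot Down (War/Conflict)"),
   ("missile", 6, "Shot Down (War/Conflict)"),
   ("pilot error", 4, "Pilot Error"),
   ("ran out of fuel", 8, "Fuel Exhaustion"),
   ("runway", 7, "Takeoff/Landing Accident"),
   ("shot down", 6, "Shot Down (War/Conflict)"),
   ("smoke", 3, "Fire/Explosion"),
   ("storm", 2, "Weather-Related"),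
   ("takeoff", 7, "Takeoff/Landing Accident"),
   ("technical issue", 1, "Mechanical Failure"),
   ("terrorist", 5, "Hijacking/Terrorism"),
   ("turbulence", 2, "Weather-Related"),
   ("weather", 2, "Weather-Related")]

-- the loop body: keep `best` unless this keyword matches and improves the priority
def pvStep (s : String) (best : Option (Int × String)) (e : String × Int × String) :
    Option (Int × String) :=
  if PySem.Str.isIn e.1 s &&
      (match best with | none => true | some b => decide (e.2.1 < b.1)) then
    some e.2
  else best

def categorize_crash_alt (summary : String) : String :=
  let s := PySem.Str.lower summary
  match pvKeywordRank.foldl (pvStep s) none with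
  | some b => b.2
  | none => "Other/Unknown"

-- ===== PRECONDITION & SPEC =====
def Spec_categorize_crash (summary : String) (out : String) : Prop := out = categorize_crash_alt summary
instance (summary : String) (out : String) : Decidable (Spec_categorize_crash summary out) := by unfold Spec_categorize_crash; infer_instance

-- ===== CLAIM (what is proved, stated in full; the proofs are below) =====
def Claim_equal_categorize_crash : Prop := ∀ (summary : String), Dom_categorize_crash summary → Spec_categorize_crash summary (categorize_crash summary)

-- ===== LEMMAS AND PROOFS =====

-- once best holds the minimal matched priority m, no later entry replaces it
theorem pvFold_keep (s : String) (m : Int) (c : String) (l : List (String × Int × String))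
    (hl : ∀ e ∈ l, PySem.Str.isIn e.1 s = true → m ≤ e.2.1) :
    l.foldl (pvStep s) (some (m, c)) = some (m, c) := by
  induction l with
  | nil => rfl
  | cons e l ih =>
    have hstep : pvStep s (some (m, c)) e = some (m, c) := by
      unfold pvStep
      by_cases hm : PySem.Str.isIn e.1 s = true
      · have := hl e (by simp) hm
        simp [not_lt.mpr this]
      · simp [Bool.not_eq_true] at hm
        simp [hm]
    rw [List.foldl_cons, hstep]
    exact ih (fun e he => hl e (by simp [he]))

-- if some entry of priority m matches, all matching entries have priority ≥ m,
-- entries of priority m carry category c, and best is none or worse than m,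
-- then the fold ends at (m, c)
theorem pvFold_finds (s : String) (m : Int) (c : String) (l : List (String × Int × String))
    (hl : ∀ e ∈ l, PySem.Str.isIn e.1 s = true → m ≤ e.2.1 ∧ (e.2.1 = m → e.2.2 = c)) :
    ∀ (acc : Option (Int × String)),
      (∃ e ∈ l, PySem.Str.isIn e.1 s = true ∧ e.2.1 = m) →
      (acc = none ∨ ∃ b, acc = some b ∧ m < b.1) →
      l.foldl (pvStep s) acc = some (m, c) := by
  induction l with
  | nil => intro acc hex _; simp at hex
  | cons e l ih =>
    intro acc hex hacc
    by_cases hm : PySem.Str.isIn e.1 s = true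
    · obtain ⟨hge, hcat⟩ := hl e (by simp) hm
      by_cases hpm : e.2.1 = m
      · have hfire : pvStep s acc e = some (m, c) := by
          unfold pvStep
          simp only [PySem.Str.isIn_eq] at hm
          rcases hacc with h | ⟨b, hb, hlt⟩
          · subst h; simp [hm, hpm, hcat hpm, Prod.ext_iff]
          · subst hb; simp [hm, hpm, hlt, hcat hpm, Prod.ext_iff]
        rw [List.foldl_cons, hfire]
        exact pvFold_keep s m c l (fun e' he' h' => (hl e' (by simp [he']) h').1)
      · have hgt : m < e.2.1 := lt_of_le_of_ne hge (fun h => hpm h.symm)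
        have hex' : ∃ e' ∈ l, PySem.Str.isIn e'.1 s = true ∧ e'.2.1 = m := by
          rcases hex with ⟨e', he', hin', hpm'⟩
          rcases List.mem_cons.mp he' with h | h
          · exact absurd (h ▸ hpm') hpm
          · exact ⟨e', h, hin', hpm'⟩
        rw [List.foldl_cons]
        refine ih (fun e' he' h' => hl e' (by simp [he']) h') _ hex' ?_
        unfold pvStep
        simp only [PySem.Str.isIn_eq] at hm
        rcases hacc with h | ⟨b, hb, hlt⟩
        · subst h; simp [hm]; exact hgt
        · subst hb
          by_cases hc : e.2.1 < b.1
          · simp [hm, hc]; exact hgt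
          · simp [hm, hc]; exact hlt
    · have hstep : pvStep s acc e = acc := by
        simp [Bool.not_eq_true] at hm
        unfold pvStep; simp [hm]
      have hex' : ∃ e' ∈ l, PySem.Str.isIn e'.1 s = true ∧ e'.2.1 = m := by
        rcases hex with ⟨e', he', hin', hpm'⟩
        rcases List.mem_cons.mp he' with h | h
        · exact absurd (h ▸ hin') (by simp [Bool.not_eq_true] at hm ⊢; exact hm)
        · exact ⟨e', h, hin', hpm'⟩
      rw [List.foldl_cons, hstep]
      exact ih (fun e' he' h' => hl e' (by simp [he']) h') acc hex' hacc

-- if nothing matches, the fold returns none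
theorem pvFold_none (s : String) (l : List (String × Int × String))
    (hl : ∀ e ∈ l, PySem.Str.isIn e.1 s = false) :
    l.foldl (pvStep s) none = none := by
  induction l with
  | nil => rfl
  | cons e l ih =>
    have hstep : pvStep s none e = none := by
      have h0 := hl e (by simp)
      simp only [PySem.Str.isIn_eq] at h0
      unfold pvStep; simp [h0]
    rw [List.foldl_cons, hstep]
    exact ih (fun e' he' => hl e' (by simp [he']))

-- ===== VERDICT (by name: the statement is the Claim_ definition above) =====
theorem categorize_crash_spec : Claim_equal_categorize_crash := by
  intro summary _
  unfold Spec_categorize_crash categorize_crash categorize_crash_alt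
  simp only [List.any_cons, List.any_nil, Bool.or_false]
  set s := PySem.Str.lower summary with hs
  by_cases h0 : (PySem.Str.isIn "collision" s || (PySem.Str.isIn "midair" s || PySem.Str.isIn "crash into another" s)) = true
  · have hfold : pvKeywordRank.foldl (pvStep s) none = some ((0 : Int), "Mid-Air Collision") := by
      apply pvFold_finds s 0 "Mid-Air Collision" pvKeywordRank ?_ none ?_ (Or.inl rfl)
      · intro e he hme
        simp only [pvKeywordRank, List.mem_cons, List.not_mem_nil, or_false] at he
        rcases he with rfl | rfl | rfl | rfl | rfl | rfl | rfl | rfl | rfl | rfl | rfl | rfl | rfl | rfl | rfl | rfl | rfl | rfl | rfl | rfl | rfl | rfl | rfl | rfl | rfl | rfl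
        · exact ⟨by decide, by decide⟩
        · exact ⟨by decide, by decide⟩
        · exact ⟨by decide, by decide⟩
        · exact ⟨by decide, by decide⟩
        · exact ⟨by decide, by decide⟩
        · exact ⟨by decide, by decide⟩
        · exact ⟨by decide, by decide⟩
        · exact ⟨by decide, by decide⟩
        · exact ⟨by decide, by decide⟩
        · exact ⟨by decide, by decide⟩
        · exact ⟨by decide, by decide⟩
        · exact ⟨by decide, by decide⟩
        · exact ⟨by decide, by decide⟩
        · exact ⟨by decide, by decide⟩
        · exact ⟨by decide, by decide⟩
        · exact ⟨by decide, by decide⟩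
        · exact ⟨by decide, by decide⟩
        · exact ⟨by decide, by decide⟩
        · exact ⟨by decide, by decide⟩
        · exact ⟨by decide, by decide⟩
        · exact ⟨by decide, by decide⟩
        · exact ⟨by decide, by decide⟩
        · exact ⟨by decide, by decide⟩
        · exact ⟨by decide, by decide⟩
        · exact ⟨by decide, by decide⟩
        · exact ⟨by decide, by decide⟩
      · simp only [Bool.or_eq_true] at h0
        rcases h0 with hb | hb | hb
        · exact ⟨("collision", 0, "Mid-Air Collision"), by decide, hb, rfl⟩
        · exact ⟨("midair", 0, "Mid-Air Collision"), by decide, hb, rfl⟩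
        · exact ⟨("crash into another", 0, "Mid-Air Collision"), by decide, hb, rfl⟩
    rw [if_pos h0, hfold]
  have h0e : (PySem.Str.isIn "collision" s || (PySem.Str.isIn "midair" s || PySem.Str.isIn "crash into another" s)) = false := Bool.eq_false_iff.mpr h0
  have h0p := Bool.or_eq_false_iff.mp h0e
  have h0q := Bool.or_eq_false_iff.mp h0p.2
  by_cases h1 : (PySem.Str.isIn "engine failure" s || (PySem.Str.isIn "mechanical failure" s || PySem.Str.isIn "technical issue" s)) = true
  · have hfold : pvKeywordRank.foldl (pvStep s) none = some ((1 : Int), "Mechanical Failure") := by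
      apply pvFold_finds s 1 "Mechanical Failure" pvKeywordRank ?_ none ?_ (Or.inl rfl)
      · intro e he hme
        simp only [pvKeywordRank, List.mem_cons, List.not_mem_nil, or_false] at he
        rcases he with rfl | rfl | rfl | rfl | rfl | rfl | rfl | rfl | rfl | rfl | rfl | rfl | rfl | rfl | rfl | rfl | rfl | rfl | rfl | rfl | rfl | rfl | rfl | rfl | rfl | rfl
        · exact ⟨by decide, by decide⟩
        · exact absurd (hme.symm.trans h0p.1) (by decide)
        · exact absurd (hme.symm.trans h0q.2) (by decide)
        · exact ⟨by decide, by decide⟩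
        · exact ⟨by decide, by decide⟩
        · exact ⟨by decide, by decide⟩
        · exact ⟨by decide, by decide⟩
        · exact ⟨by decide, by decide⟩
        · exact ⟨by decide, by decide⟩
        · exact ⟨by decide, by decide⟩
        · exact ⟨by decide, by decide⟩
        · exact ⟨by decide, by decide⟩
        · exact absurd (hme.symm.trans h0q.1) (by decide)
        · exact ⟨by decide, by decide⟩
        · exact ⟨by decide, by decide⟩
        · exact ⟨by decide, by decide⟩
        · exact ⟨by decide, by decide⟩
        · exact ⟨by decide, by decide⟩
        · exact ⟨by decide, by decide⟩
        · exact ⟨by decide, by decide⟩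
        · exact ⟨by decide, by decide⟩
        · exact ⟨by decide, by decide⟩
        · exact ⟨by decide, by decide⟩
        · exact ⟨by decide, by decide⟩
        · exact ⟨by decide, by decide⟩
        · exact ⟨by decide, by decide⟩
      · simp only [Bool.or_eq_true] at h1
        rcases h1 with hb | hb | hb
        · exact ⟨("engine failure", 1, "Mechanical Failure"), by decide, hb, rfl⟩
        · exact ⟨("mechanical failure", 1, "Mechanical Failure"), by decide, hb, rfl⟩
        · exact ⟨("technical issue", 1, "Mechanical Failure"), by decide, hb, rfl⟩
    rw [if_neg h0, if_pos h1, hfold]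
  have h1e : (PySem.Str.isIn "engine failure" s || (PySem.Str.isIn "mechanical failure" s || PySem.Str.isIn "technical issue" s)) = false := Bool.eq_false_iff.mpr h1
  have h1p := Bool.or_eq_false_iff.mp h1e
  have h1q := Bool.or_eq_false_iff.mp h1p.2
  by_cases h2 : (PySem.Str.isIn "weather" s || (PySem.Str.isIn "storm" s || PySem.Str.isIn "turbulence" s)) = true
  · have hfold : pvKeywordRank.foldl (pvStep s) none = some ((2 : Int), "Weather-Related") := by
      apply pvFold_finds s 2 "Weather-Related" pvKeywordRank ?_ none ?_ (Or.inl rfl)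
      · intro e he hme
        simp only [pvKeywordRank, List.mem_cons, List.not_mem_nil, or_false] at he
        rcases he with rfl | rfl | rfl | rfl | rfl | rfl | rfl | rfl | rfl | rfl | rfl | rfl | rfl | rfl | rfl | rfl | rfl | rfl | rfl | rfl | rfl | rfl | rfl | rfl | rfl | rfl
        · exact ⟨by decide, by decide⟩
        · exact absurd (hme.symm.trans h0p.1) (by decide)
        · exact absurd (hme.symm.trans h0q.2) (by decide)
        · exact absurd (hme.symm.trans h1p.1) (by decide)
        · exact ⟨by decide, by decide⟩
        · exact ⟨by decide, by decide⟩
        · exact ⟨by decide, by decide⟩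
        · exact ⟨by decide, by decide⟩
        · exact ⟨by decide, by decide⟩
        · exact ⟨by decide, by decide⟩
        · exact ⟨by decide, by decide⟩
        · exact absurd (hme.symm.trans h1q.1) (by decide)
        · exact absurd (hme.symm.trans h0q.1) (by decide)
        · exact ⟨by decide, by decide⟩
        · exact ⟨by decide, by decide⟩
        · exact ⟨by decide, by decide⟩
        · exact ⟨by decide, by decide⟩
        · exact ⟨by decide, by decide⟩
        · exact ⟨by decide, by decide⟩
        · exact ⟨by decide, by decide⟩
        · exact ⟨by decide, by decide⟩
        · exact ⟨by decide, by decide⟩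
        · exact absurd (hme.symm.trans h1q.2) (by decide)
        · exact ⟨by decide, by decide⟩
        · exact ⟨by decide, by decide⟩
        · exact ⟨by decide, by decide⟩
      · simp only [Bool.or_eq_true] at h2
        rcases h2 with hb | hb | hb
        · exact ⟨("weather", 2, "Weather-Related"), by decide, hb, rfl⟩
        · exact ⟨("storm", 2, "Weather-Related"), by decide, hb, rfl⟩
        · exact ⟨("turbulence", 2, "Weather-Related"), by decide, hb, rfl⟩
    rw [if_neg h0, if_neg h1, if_pos h2, hfold]
  have h2e : (PySem.Str.isIn "weather" s || (PySem.Str.isIn "storm" s || PySem.Str.isIn "turbulence" s)) = false := Bool.eq_false_iff.mpr h2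
  have h2p := Bool.or_eq_false_iff.mp h2e
  have h2q := Bool.or_eq_false_iff.mp h2p.2
  by_cases h3 : (PySem.Str.isIn "fire" s || (PySem.Str.isIn "explosion" s || PySem.Str.isIn "smoke" s)) = true
  · have hfold : pvKeywordRank.foldl (pvStep s) none = some ((3 : Int), "Fire/Explosion") := by
      apply pvFold_finds s 3 "Fire/Explosion" pvKeywordRank ?_ none ?_ (Or.inl rfl)
      · intro e he hme
        simp only [pvKeywordRank, List.mem_cons, List.not_mem_nil, or_false] at he
        rcases he with rfl | rfl | rfl | rfl | rfl | rfl | rfl | rfl | rfl | rfl | rfl | rfl | rfl | rfl | rfl | rfl | rfl | rfl | rfl | rfl | rfl | rfl | rfl | rfl | rfl | rfl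
        · exact ⟨by decide, by decide⟩
        · exact absurd (hme.symm.trans h0p.1) (by decide)
        · exact absurd (hme.symm.trans h0q.2) (by decide)
        · exact absurd (hme.symm.trans h1p.1) (by decide)
        · exact ⟨by decide, by decide⟩
        · exact ⟨by decide, by decide⟩
        · exact ⟨by decide, by decide⟩
        · exact ⟨by decide, by decide⟩
        · exact ⟨by decide, by decide⟩
        · exact ⟨by decide, by decide⟩
        · exact ⟨by decide, by decide⟩
        · exact absurd (hme.symm.trans h1q.1) (by decide)
        · exact absurd (hme.symm.trans h0q.1) (by decide)
        · exact ⟨by decide, by decide⟩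
        · exact ⟨by decide, by decide⟩
        · exact ⟨by decide, by decide⟩
        · exact ⟨by decide, by decide⟩
        · exact ⟨by decide, by decide⟩
        · exact ⟨by decide, by decide⟩
        · exact ⟨by decide, by decide⟩
        · exact absurd (hme.symm.trans h2q.1) (by decide)
        · exact ⟨by decide, by decide⟩
        · exact absurd (hme.symm.trans h1q.2) (by decide)
        · exact ⟨by decide, by decide⟩
        · exact absurd (hme.symm.trans h2q.2) (by decide)
        · exact absurd (hme.symm.trans h2p.1) (by decide)
      · simp only [Bool.or_eq_true] at h3
        rcases h3 with hb | hb | hb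
        · exact ⟨("fire", 3, "Fire/Explosion"), by decide, hb, rfl⟩
        · exact ⟨("explosion", 3, "Fire/Explosion"), by decide, hb, rfl⟩
        · exact ⟨("smoke", 3, "Fire/Explosion"), by decide, hb, rfl⟩
    rw [if_neg h0, if_neg h1, if_neg h2, if_pos h3, hfold]
  have h3e : (PySem.Str.isIn "fire" s || (PySem.Str.isIn "explosion" s || PySem.Str.isIn "smoke" s)) = false := Bool.eq_false_iff.mpr h3
  have h3p := Bool.or_eq_false_iff.mp h3e
  have h3q := Bool.or_eq_false_iff.mp h3p.2
  by_cases h4 : (PySem.Str.isIn "pilot error" s || (PySem.Str.isIn "loss of control" s || PySem.Str.isIn "incorrect maneuver" s)) = true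
  · have hfold : pvKeywordRank.foldl (pvStep s) none = some ((4 : Int), "Pilot Error") := by
      apply pvFold_finds s 4 "Pilot Error" pvKeywordRank ?_ none ?_ (Or.inl rfl)
      · intro e he hme
        simp only [pvKeywordRank, List.mem_cons, List.not_mem_nil, or_false] at he
        rcases he with rfl | rfl | rfl | rfl | rfl | rfl | rfl | rfl | rfl | rfl | rfl | rfl | rfl | rfl | rfl | rfl | rfl | rfl | rfl | rfl | rfl | rfl | rfl | rfl | rfl | rfl
        · exact ⟨by decide, by decide⟩
        · exact absurd (hme.symm.trans h0p.1) (by decide)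
        · exact absurd (hme.symm.trans h0q.2) (by decide)
        · exact absurd (hme.symm.trans h1p.1) (by decide)
        · exact absurd (hme.symm.trans h3q.1) (by decide)
        · exact absurd (hme.symm.trans h3p.1) (by decide)
        · exact ⟨by decide, by decide⟩
        · exact ⟨by decide, by decide⟩
        · exact ⟨by decide, by decide⟩
        · exact ⟨by decide, by decide⟩
        · exact ⟨by decide, by decide⟩
        · exact absurd (hme.symm.trans h1q.1) (by decide)
        · exact absurd (hme.symm.trans h0q.1) (by decide)
        · exact ⟨by decide, by decide⟩
        · exact ⟨by decide, by decide⟩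
        · exact ⟨by decide, by decide⟩
        · exact ⟨by decide, by decide⟩
        · exact ⟨by decide, by decide⟩
        · exact ⟨by decide, by decide⟩
        · exact absurd (hme.symm.trans h3q.2) (by decide)
        · exact absurd (hme.symm.trans h2q.1) (by decide)
        · exact ⟨by decide, by decide⟩
        · exact absurd (hme.symm.trans h1q.2) (by decide)
        · exact ⟨by decide, by decide⟩
        · exact absurd (hme.symm.trans h2q.2) (by decide)
        · exact absurd (hme.symm.trans h2p.1) (by decide)
      · simp only [Bool.or_eq_true] at h4
        rcases h4 with hb | hb | hb
        · exact ⟨("pilot error", 4, "Pilot Error"), by decide, hb, rfl⟩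
        · exact ⟨("loss of control", 4, "Pilot Error"), by decide, hb, rfl⟩
        · exact ⟨("incorrect maneuver", 4, "Pilot Error"), by decide, hb, rfl⟩
    rw [if_neg h0, if_neg h1, if_neg h2, if_neg h3, if_pos h4, hfold]
  have h4e : (PySem.Str.isIn "pilot error" s || (PySem.Str.isIn "loss of control" s || PySem.Str.isIn "incorrect maneuver" s)) = false := Bool.eq_false_iff.mpr h4
  have h4p := Bool.or_eq_false_iff.mp h4e
  have h4q := Bool.or_eq_false_iff.mp h4p.2
  by_cases h5 : (PySem.Str.isIn "hijacking" s || (PySem.Str.isIn "terrorist" s || PySem.Str.isIn "bomb" s)) = true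
  · have hfold : pvKeywordRank.foldl (pvStep s) none = some ((5 : Int), "Hijacking/Terrorism") := by
      apply pvFold_finds s 5 "Hijacking/Terrorism" pvKeywordRank ?_ none ?_ (Or.inl rfl)
      · intro e he hme
        simp only [pvKeywordRank, List.mem_cons, List.not_mem_nil, or_false] at he
        rcases he with rfl | rfl | rfl | rfl | rfl | rfl | rfl | rfl | rfl | rfl | rfl | rfl | rfl | rfl | rfl | rfl | rfl | rfl | rfl | rfl | rfl | rfl | rfl | rfl | rfl | rfl
        · exact ⟨by decide, by decide⟩
        · exact absurd (hme.symm.trans h0p.1) (by decide)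
        · exact absurd (hme.symm.trans h0q.2) (by decide)
        · exact absurd (hme.symm.trans h1p.1) (by decide)
        · exact absurd (hme.symm.trans h3q.1) (by decide)
        · exact absurd (hme.symm.trans h3p.1) (by decide)
        · exact ⟨by decide, by decide⟩
        · exact ⟨by decide, by decide⟩
        · exact absurd (hme.symm.trans h4q.2) (by decide)
        · exact ⟨by decide, by decide⟩
        · exact absurd (hme.symm.trans h4q.1) (by decide)
        · exact absurd (hme.symm.trans h1q.1) (by decide)
        · exact absurd (hme.symm.trans h0q.1) (by decide)
        · exact ⟨by decide, by decide⟩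
        · exact ⟨by decide, by decide⟩
        · exact absurd (hme.symm.trans h4p.1) (by decide)
        · exact ⟨by decide, by decide⟩
        · exact ⟨by decide, by decide⟩
        · exact ⟨by decide, by decide⟩
        · exact absurd (hme.symm.trans h3q.2) (by decide)
        · exact absurd (hme.symm.trans h2q.1) (by decide)
        · exact ⟨by decide, by decide⟩
        · exact absurd (hme.symm.trans h1q.2) (by decide)
        · exact ⟨by decide, by decide⟩
        · exact absurd (hme.symm.trans h2q.2) (by decide)
        · exact absurd (hme.symm.trans h2p.1) (by decide)
      · simp only [Bool.or_eq_true] at h5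
        rcases h5 with hb | hb | hb
        · exact ⟨("hijacking", 5, "Hijacking/Terrorism"), by decide, hb, rfl⟩
        · exact ⟨("terrorist", 5, "Hijacking/Terrorism"), by decide, hb, rfl⟩
        · exact ⟨("bomb", 5, "Hijacking/Terrorism"), by decide, hb, rfl⟩
    rw [if_neg h0, if_neg h1, if_neg h2, if_neg h3, if_neg h4, if_pos h5, hfold]
  have h5e : (PySem.Str.isIn "hijacking" s || (PySem.Str.isIn "terrorist" s || PySem.Str.isIn "bomb" s)) = false := Bool.eq_false_iff.mpr h5
  have h5p := Bool.or_eq_false_iff.mp h5e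
  have h5q := Bool.or_eq_false_iff.mp h5p.2
  by_cases h6 : (PySem.Str.isIn "shot down" s || (PySem.Str.isIn "missile" s || PySem.Str.isIn "military attack" s)) = true
  · have hfold : pvKeywordRank.foldl (pvStep s) none = some ((6 : Int), "Shot Down (War/Conflict)") := by
      apply pvFold_finds s 6 "Shot Down (War/Conflict)" pvKeywordRank ?_ none ?_ (Or.inl rfl)
      · intro e he hme
        simp only [pvKeywordRank, List.mem_cons, List.not_mem_nil, or_false] at he
        rcases he with rfl | rfl | rfl | rfl | rfl | rfl | rfl | rfl | rfl | rfl | rfl | rfl | rfl | rfl | rfl | rfl | rfl | rfl | rfl | rfl | rfl | rfl | rfl | rfl | rfl | rfl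
        · exact absurd (hme.symm.trans h5q.2) (by decide)
        · exact absurd (hme.symm.trans h0p.1) (by decide)
        · exact absurd (hme.symm.trans h0q.2) (by decide)
        · exact absurd (hme.symm.trans h1p.1) (by decide)
        · exact absurd (hme.symm.trans h3q.1) (by decide)
        · exact absurd (hme.symm.trans h3p.1) (by decide)
        · exact ⟨by decide, by decide⟩
        · exact absurd (hme.symm.trans h5p.1) (by decide)
        · exact absurd (hme.symm.trans h4q.2) (by decide)
        · exact ⟨by decide, by decide⟩
        · exact absurd (hme.symm.trans h4q.1) (by decide)
        · exact absurd (hme.symm.trans h1q.1) (by decide)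
        · exact absurd (hme.symm.trans h0q.1) (by decide)
        · exact ⟨by decide, by decide⟩
        · exact ⟨by decide, by decide⟩
        · exact absurd (hme.symm.trans h4p.1) (by decide)
        · exact ⟨by decide, by decide⟩
        · exact ⟨by decide, by decide⟩
        · exact ⟨by decide, by decide⟩
        · exact absurd (hme.symm.trans h3q.2) (by decide)
        · exact absurd (hme.symm.trans h2q.1) (by decide)
        · exact ⟨by decide, by decide⟩
        · exact absurd (hme.symm.trans h1q.2) (by decide)
        · exact absurd (hme.symm.trans h5q.1) (by decide)
        · exact absurd (hme.symm.trans h2q.2) (by decide)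
        · exact absurd (hme.symm.trans h2p.1) (by decide)
      · simp only [Bool.or_eq_true] at h6
        rcases h6 with hb | hb | hb
        · exact ⟨("shot down", 6, "Shot Down (War/Conflict)"), by decide, hb, rfl⟩
        · exact ⟨("missile", 6, "Shot Down (War/Conflict)"), by decide, hb, rfl⟩
        · exact ⟨("military attack", 6, "Shot Down (War/Conflict)"), by decide, hb, rfl⟩
    rw [if_neg h0, if_neg h1, if_neg h2, if_neg h3, if_neg h4, if_neg h5, if_pos h6, hfold]
  have h6e : (PySem.Str.isIn "shot down" s || (PySem.Str.isIn "missile" s || PySem.Str.isIn "military attack" s)) = false := Bool.eq_false_iff.mpr h6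
  have h6p := Bool.or_eq_false_iff.mp h6e
  have h6q := Bool.or_eq_false_iff.mp h6p.2
  by_cases h7 : (PySem.Str.isIn "runway" s || (PySem.Str.isIn "takeoff" s || PySem.Str.isIn "landing" s)) = true
  · have hfold : pvKeywordRank.foldl (pvStep s) none = some ((7 : Int), "Takeoff/Landing Accident") := by
      apply pvFold_finds s 7 "Takeoff/Landing Accident" pvKeywordRank ?_ none ?_ (Or.inl rfl)
      · intro e he hme
        simp only [pvKeywordRank, List.mem_cons, List.not_mem_nil, or_false] at he
        rcases he with rfl | rfl | rfl | rfl | rfl | rfl | rfl | rfl | rfl | rfl | rfl | rfl | rfl | rfl | rfl | rfl | rfl | rfl | rfl | rfl | rfl | rfl | rfl | rfl | rfl | rfl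
        · exact absurd (hme.symm.trans h5q.2) (by decide)
        · exact absurd (hme.symm.trans h0p.1) (by decide)
        · exact absurd (hme.symm.trans h0q.2) (by decide)
        · exact absurd (hme.symm.trans h1p.1) (by decide)
        · exact absurd (hme.symm.trans h3q.1) (by decide)
        · exact absurd (hme.symm.trans h3p.1) (by decide)
        · exact ⟨by decide, by decide⟩
        · exact absurd (hme.symm.trans h5p.1) (by decide)
        · exact absurd (hme.symm.trans h4q.2) (by decide)
        · exact ⟨by decide, by decide⟩
        · exact absurd (hme.symm.trans h4q.1) (by decide)
        · exact absurd (hme.symm.trans h1q.1) (by decide)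
        · exact absurd (hme.symm.trans h0q.1) (by decide)
        · exact absurd (hme.symm.trans h6q.2) (by decide)
        · exact absurd (hme.symm.trans h6q.1) (by decide)
        · exact absurd (hme.symm.trans h4p.1) (by decide)
        · exact ⟨by decide, by decide⟩
        · exact ⟨by decide, by decide⟩
        · exact absurd (hme.symm.trans h6p.1) (by decide)
        · exact absurd (hme.symm.trans h3q.2) (by decide)
        · exact absurd (hme.symm.trans h2q.1) (by decide)
        · exact ⟨by decide, by decide⟩
        · exact absurd (hme.symm.trans h1q.2) (by decide)
        · exact absurd (hme.symm.trans h5q.1) (by decide)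
        · exact absurd (hme.symm.trans h2q.2) (by decide)
        · exact absurd (hme.symm.trans h2p.1) (by decide)
      · simp only [Bool.or_eq_true] at h7
        rcases h7 with hb | hb | hb
        · exact ⟨("runway", 7, "Takeoff/Landing Accident"), by decide, hb, rfl⟩
        · exact ⟨("takeoff", 7, "Takeoff/Landing Accident"), by decide, hb, rfl⟩
        · exact ⟨("landing", 7, "Takeoff/Landing Accident"), by decide, hb, rfl⟩
    rw [if_neg h0, if_neg h1, if_neg h2, if_neg h3, if_neg h4, if_neg h5, if_neg h6, if_pos h7, hfold]
  have h7e : (PySem.Str.isIn "runway" s || (PySem.Str.isIn "takeoff" s || PySem.Str.isIn "landing" s)) = false := Bool.eq_false_iff.mpr h7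
  have h7p := Bool.or_eq_false_iff.mp h7e
  have h7q := Bool.or_eq_false_iff.mp h7p.2
  by_cases h8 : (PySem.Str.isIn "fuel exhaustion" s || PySem.Str.isIn "ran out of fuel" s) = true
  · have hfold : pvKeywordRank.foldl (pvStep s) none = some ((8 : Int), "Fuel Exhaustion") := by
      apply pvFold_finds s 8 "Fuel Exhaustion" pvKeywordRank ?_ none ?_ (Or.inl rfl)
      · intro e he hme
        simp only [pvKeywordRank, List.mem_cons, List.not_mem_nil, or_false] at he
        rcases he with rfl | rfl | rfl | rfl | rfl | rfl | rfl | rfl | rfl | rfl | rfl | rfl | rfl | rfl | rfl | rfl | rfl | rfl | rfl | rfl | rfl | rfl | rfl | rfl | rfl | rfl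
        · exact absurd (hme.symm.trans h5q.2) (by decide)
        · exact absurd (hme.symm.trans h0p.1) (by decide)
        · exact absurd (hme.symm.trans h0q.2) (by decide)
        · exact absurd (hme.symm.trans h1p.1) (by decide)
        · exact absurd (hme.symm.trans h3q.1) (by decide)
        · exact absurd (hme.symm.trans h3p.1) (by decide)
        · exact ⟨by decide, by decide⟩
        · exact absurd (hme.symm.trans h5p.1) (by decide)
        · exact absurd (hme.symm.trans h4q.2) (by decide)
        · exact absurd (hme.symm.trans h7q.2) (by decide)
        · exact absurd (hme.symm.trans h4q.1) (by decide)
        · exact absurd (hme.symm.trans h1q.1) (by decide)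
        · exact absurd (hme.symm.trans h0q.1) (by decide)
        · exact absurd (hme.symm.trans h6q.2) (by decide)
        · exact absurd (hme.symm.trans h6q.1) (by decide)
        · exact absurd (hme.symm.trans h4p.1) (by decide)
        · exact ⟨by decide, by decide⟩
        · exact absurd (hme.symm.trans h7p.1) (by decide)
        · exact absurd (hme.symm.trans h6p.1) (by decide)
        · exact absurd (hme.symm.trans h3q.2) (by decide)
        · exact absurd (hme.symm.trans h2q.1) (by decide)
        · exact absurd (hme.symm.trans h7q.1) (by decide)
        · exact absurd (hme.symm.trans h1q.2) (by decide)
        · exact absurd (hme.symm.trans h5q.1) (by decide)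
        · exact absurd (hme.symm.trans h2q.2) (by decide)
        · exact absurd (hme.symm.trans h2p.1) (by decide)
      · simp only [Bool.or_eq_true] at h8
        rcases h8 with hb | hb
        · exact ⟨("fuel exhaustion", 8, "Fuel Exhaustion"), by decide, hb, rfl⟩
        · exact ⟨("ran out of fuel", 8, "Fuel Exhaustion"), by decide, hb, rfl⟩
    rw [if_neg h0, if_neg h1, if_neg h2, if_neg h3, if_neg h4, if_neg h5, if_neg h6, if_neg h7, if_pos h8, hfold]
  have h8e : (PySem.Str.isIn "fuel exhaustion" s || PySem.Str.isIn "ran out of fuel" s) = false := Bool.eq_false_iff.mpr h8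
  have h8p := Bool.or_eq_false_iff.mp h8e
  have hfold : pvKeywordRank.foldl (pvStep s) none = none := by
    apply pvFold_none
    intro e he
    simp only [pvKeywordRank, List.mem_cons, List.not_mem_nil, or_false] at he
    rcases he with rfl | rfl | rfl | rfl | rfl | rfl | rfl | rfl | rfl | rfl | rfl | rfl | rfl | rfl | rfl | rfl | rfl | rfl | rfl | rfl | rfl | rfl | rfl | rfl | rfl | rfl
    · exact h5q.2
    · exact h0p.1
    · exact h0q.2
    · exact h1p.1
    · exact h3q.1
    · exact h3p.1
    · exact h8p.1
    · exact h5p.1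
    · exact h4q.2
    · exact h7q.2
    · exact h4q.1
    · exact h1q.1
    · exact h0q.1
    · exact h6q.2
    · exact h6q.1
    · exact h4p.1
    · exact h8p.2
    · exact h7p.1
    · exact h6p.1
    · exact h3q.2
    · exact h2q.1
    · exact h7q.1
    · exact h1q.2
    · exact h5q.1
    · exact h2q.2
    · exact h2p.1
  rw [if_neg h0, if_neg h1, if_neg h2, if_neg h3, if_neg h4, if_neg h5, if_neg h6, if_neg h7, if_neg h8, hfold]
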